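-- pv_equiv track=rewrite | github.com/Pozik-vlozik/Traveling-company | TravelingCompProg/forms/TourOrderModule/TourOrderDBaser.py | price_list_producing
-- ===== SOURCE A (Python) =====
-- def price_list_producing(price_list: list):
--     start_dates = []
--     end_dates = []
--     prices = []
--     for note in price_list:
--         start_dates.append(note[2])
--         end_dates.append(note[3])
--         prices.append(note[4])
--
--     return start_dates, end_dates, prices
-- ===== SOURCE B (Python) =====
-- def price_list_producing(price_list: list):
--     flat = [row[i] for row in price_list for i in (2, 3, 4)]
--     return flat[0::3], flat[1::3], flat[2::3]
-- ===== Notes on version B (the rewrite author's own statement) =====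
-- stated objective: alternative
-- what changed: Interleaves the three wanted fields of every row into one flat list in a single comprehension, then de-interleaves it into the three result lists with stride-3 slices flat[0::3], flat[1::3], flat[2::3], instead of A's loop appending into three accumulators.
import Mathlib
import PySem

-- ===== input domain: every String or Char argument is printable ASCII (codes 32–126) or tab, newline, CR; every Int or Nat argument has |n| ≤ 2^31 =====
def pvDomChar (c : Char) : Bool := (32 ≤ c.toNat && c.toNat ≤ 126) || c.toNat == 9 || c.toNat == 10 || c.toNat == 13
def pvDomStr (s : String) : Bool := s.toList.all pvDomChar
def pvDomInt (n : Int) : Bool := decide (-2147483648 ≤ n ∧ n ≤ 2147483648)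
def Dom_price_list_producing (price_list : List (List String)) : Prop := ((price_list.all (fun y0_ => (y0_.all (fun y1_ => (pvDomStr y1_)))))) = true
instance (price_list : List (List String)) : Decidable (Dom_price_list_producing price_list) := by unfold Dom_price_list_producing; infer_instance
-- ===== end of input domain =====

-- B interleaves the three wanted fields into one flat list and de-interleaves it with
-- stride-3 slices, instead of A's loop appending into three accumulators; return value only.

-- ===== PORT A =====
-- note[2] etc.: exact for these literal nonnegative indices whenever the row is long
-- enough (guaranteed by Pre_); where Python raises IndexError we are outside Pre_.
def price_list_producing (price_list : List (List String)) : List String × List String × List String :=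
  price_list.foldl
    (fun acc note =>
      (acc.1 ++ [note.getD 2 ""], acc.2.1 ++ [note.getD 3 ""], acc.2.2 ++ [note.getD 4 ""]))
    ([], [], [])

-- ===== PORT B =====
-- flat = [row[i] for row in price_list for i in (2, 3, 4)]; row[i]: exact for these
-- literal nonnegative indices whenever the row is long enough (guaranteed by Pre_).
-- flat[k::3] is PySem.List.slice?; step 3 ≠ 0, so slice? is always `some` and the
-- `.getD []` default is never taken.
def price_list_producing_alt (price_list : List (List String)) : List String × List String × List String :=
  let flat := price_list.flatMap (fun row => [2, 3, 4].map (fun i => row.getD i ""))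
  ((PySem.List.slice? flat (some 0) none 3).getD [],
   (PySem.List.slice? flat (some 1) none 3).getD [],
   (PySem.List.slice? flat (some 2) none 3).getD [])

-- ===== PRECONDITION & SPEC =====
-- Pre_ excludes exactly the inputs with a row shorter than 5, on which A raises IndexError.
def Pre_price_list_producing (price_list : List (List String)) : Prop :=
  ∀ r ∈ price_list, 5 ≤ r.length
instance (price_list : List (List String)) : Decidable (Pre_price_list_producing price_list) := by unfold Pre_price_list_producing; infer_instance

def pvWitness_price_list_producing : List (List String) := [["a", "b", "c", "d", "e"]]

def Spec_price_list_producing (price_list : List (List String)) (out : List String × List String × List String) : Prop := out = price_list_producing_alt price_list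
instance (price_list : List (List String)) (out : List String × List String × List String) : Decidable (Spec_price_list_producing price_list out) := by unfold Spec_price_list_producing; infer_instance

-- ===== CLAIM (what is proved, stated in full; the proofs are below) =====
def Claim_equal_price_list_producing : Prop := ∀ (price_list : List (List String)), Dom_price_list_producing price_list → Pre_price_list_producing price_list → Spec_price_list_producing price_list (price_list_producing price_list)

-- ===== LEMMAS AND PROOFS =====

-- A's fold, characterised: it appends the three projected columns to the accumulators.
theorem foldA_eq (pl : List (List String)) (s e p : List String) :
    pl.foldl
      (fun acc note =>
        (acc.1 ++ [note.getD 2 ""], acc.2.1 ++ [note.getD 3 ""], acc.2.2 ++ [note.getD 4 ""]))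
      (s, e, p)
    = (s ++ pl.map (fun r => r.getD 2 ""),
       e ++ pl.map (fun r => r.getD 3 ""),
       p ++ pl.map (fun r => r.getD 4 "")) := by
  induction pl generalizing s e p with
  | nil => simp
  | cons r rs ih => rw [List.foldl_cons, ih]; simp

-- B's flat interleaved list, abbreviated for the lemmas below
def flat3 (pl : List (List String)) : List String :=
  pl.flatMap (fun row => [2, 3, 4].map (fun i => row.getD i ""))

theorem flat3_length (pl : List (List String)) : (flat3 pl).length = 3 * pl.length := by
  induction pl with
  | nil => rfl
  | cons r rs ih => simp [flat3] at ih ⊢; omega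

-- element 3*j+k of the flat list is field 2+k of row j
theorem flat3_getElem? (pl : List (List String)) (j k : Nat) (hk : k < 3) (hj : j < pl.length) :
    (flat3 pl)[3*j + k]? = some ((pl.getD j []).getD (2+k) "") := by
  induction pl generalizing j with
  | nil => simp at hj
  | cons r rs ih =>
    cases j with
    | zero =>
      have : flat3 (r :: rs) = [r.getD 2 "", r.getD 3 "", r.getD 4 ""] ++ flat3 rs := by
        simp [flat3]
      rw [this]
      interval_cases k <;> simp
    | succ j =>
      have hsplit : flat3 (r :: rs) = [r.getD 2 "", r.getD 3 "", r.getD 4 ""] ++ flat3 rs := by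
        simp [flat3]
      rw [hsplit]
      have hidx : 3*(j+1) + k = 3 + (3*j + k) := by omega
      rw [hidx, List.getElem?_append_right (by simp)]
      simp only [List.length_cons, List.length_nil]
      have : 3 + (3*j + k) - 3 = 3*j + k := by omega
      rw [this, ih j (by simpa using Nat.lt_of_succ_lt_succ hj)]
      simp

-- the stride-3 slice starting at k < 3 of the flat list is column 2+k of the rows
theorem slice3_eq_col (pl : List (List String)) (k : Nat) (hk : k < 3) :
    PySem.List.slice? (flat3 pl) (some (k:Int)) none 3
      = some (pl.map (fun r => r.getD (2+k) "")) := by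
  have hlen := flat3_length pl
  have hget : ∀ j < pl.length, (flat3 pl)[3*j+k]? = some ((flat3 pl).getD (3*j+k) "") := by
    intro j hj
    rw [List.getD_eq_getElem?_getD, flat3_getElem? pl j k hk hj, Option.getD_some]
  -- evaluate slice? by its definition
  rw [show PySem.List.slice? (flat3 pl) (some (k:Int)) none 3
        = some ((List.range pl.length).map (fun j => (flat3 pl).getD (3*j+k) "")) from ?_]
  · congr 1
    apply List.ext_getElem (by simp)
    intro i h1 h2
    simp only [List.getElem_map, List.getElem_range]
    have hi : i < pl.length := by simpa using h1
    have hlt : 3*i + k < (flat3 pl).length := by omega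
    have := flat3_getElem? pl i k hk hi
    rw [List.getElem?_eq_getElem hlt] at this
    simp only [List.getD_eq_getElem?_getD, List.getElem?_eq_getElem hlt]
    have hv : (flat3 pl)[3*i+k] = (pl.getD i []).getD (2+k) "" := by
      exact Option.some.inj this
    simp [hv, List.getD_eq_getElem?_getD, List.getElem?_eq_getElem hi]
  · -- slice? with nonnegative start k, no stop, step 3 on a list of length 3*m
    simp only [PySem.List.slice?, PySem.List.sliceIndices]
    norm_num
    rcases Nat.eq_zero_or_pos pl.length with hm | hm
    · have h0 : flat3 pl = [] := List.eq_nil_of_length_eq_zero (by omega)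
      rw [h0, hm]; simp
    · have hknn : ¬ ((k:Int) < 0) := by omega
      rw [if_neg hknn, hlen]
      have hmin : min (k:Int) ((3*pl.length:Nat):Int) = (k:Int) := by push_cast; omega
      rw [hmin]
      have hlt : (k:Int) < ((3*pl.length:Nat):Int) := by push_cast; omega
      rw [if_pos hlt]
      have hcount : ((((3*pl.length:Nat):Int) - k + 3 - 1) / 3).toNat = pl.length := by
        push_cast; interval_cases k <;> omega
      rw [hcount]
      rw [List.filterMap_eq_map_iff_forall_eq_some]
      intro j hj
      simp only [List.mem_range] at hj
      have : ((k:Int) + 3 * (j:Int)).toNat = 3*j + k := by omega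
      rw [this]
      exact hget j hj

-- ===== VERDICT (by name: the statement is the Claim_ definition above) =====
theorem price_list_producing_spec : Claim_equal_price_list_producing := by
  intro pl _ _
  unfold Spec_price_list_producing price_list_producing price_list_producing_alt
  rw [foldA_eq]
  have h0 := slice3_eq_col pl 0 (by omega)
  have h1 := slice3_eq_col pl 1 (by omega)
  have h2 := slice3_eq_col pl 2 (by omega)
  simp only [flat3, List.map_cons, List.map_nil] at h0 h1 h2
  push_cast at h0 h1 h2
  simp only [List.map_cons, List.map_nil, h0, h1, h2, Option.getD_some, List.nil_append]
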